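-- pv_equiv track=rewrite | github.com/DragunWF/Competitive-Programming | CodeWars/python/7_kyu/80s_kids_1.py | total_licks
-- ===== SOURCE A (Python) =====
-- def total_licks(env: dict):
--     licks = 252
--     toughest_challenge = None
--     max_challenge = 0
--     for condition, value in env.items():
--         licks += value
--         if value > max_challenge:
--             toughest_challenge = condition
--             max_challenge = value
--     output = f"It took {licks} licks to get to the tootsie roll center of a tootsie pop."
--     if not toughest_challenge is None:
--         output += f" The toughest challenge was {toughest_challenge}."
--     return output
-- ===== SOURCE B (Python) =====
-- def total_licks(env: dict):
--     licks = 252 + sum(env.values())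
--     output = f"It took {licks} licks to get to the tootsie roll center of a tootsie pop."
--     if env and max(env.values()) > 0:
--         toughest = max(env, key=env.get)
--         output += f" The toughest challenge was {toughest}."
--     return output
-- ===== Notes on version B (the rewrite author's own statement) =====
-- stated objective: simpler
-- what changed: Replaces the fused accumulation loop (running total + running strict max + remembered key) by two library passes: licks = 252 + sum(values), then, when the dict is non-empty and its maximum value is positive, the first maximal key via max(env, key=env.get).
import Mathlib
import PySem

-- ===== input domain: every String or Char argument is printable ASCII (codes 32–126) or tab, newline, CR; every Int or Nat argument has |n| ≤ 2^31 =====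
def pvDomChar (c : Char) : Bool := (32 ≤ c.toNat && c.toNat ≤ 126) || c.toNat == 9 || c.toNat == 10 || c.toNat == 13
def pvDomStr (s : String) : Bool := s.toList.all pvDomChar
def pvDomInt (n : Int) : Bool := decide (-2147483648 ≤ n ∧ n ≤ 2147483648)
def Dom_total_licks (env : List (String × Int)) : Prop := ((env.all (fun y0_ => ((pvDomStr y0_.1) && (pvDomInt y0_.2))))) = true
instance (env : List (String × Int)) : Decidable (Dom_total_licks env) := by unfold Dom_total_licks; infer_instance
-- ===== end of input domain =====

-- B replaces A's fused loop (running total + running strict max + remembered key) by two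
-- library passes: 252 + sum of the values, then the first maximal key when the max is positive.


-- ===== PORT A =====
def total_licks (env : List (String × Int)) : String :=
  -- licks = 252; toughest_challenge = None; max_challenge = 0; for condition, value in env.items(): …
  let st : Int × Option String × Int :=
    env.foldl
      (fun (s : Int × Option String × Int) cv =>
        let licks := s.1 + cv.2
        if cv.2 > s.2.2 then (licks, some cv.1, cv.2) else (licks, s.2.1, s.2.2))
      (252, none, 0)
  let output := "It took " ++ PySem.Int.toStr st.1 ++ " licks to get to the tootsie roll center of a tootsie pop."
  match st.2.1 with
  | some t => output ++ " The toughest challenge was " ++ t ++ "."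
  | none => output

-- ===== PORT B =====
def total_licks_alt (env : List (String × Int)) : String :=
  -- licks = 252 + sum(env.values())
  let licks : Int := 252 + (env.map Prod.snd).sum
  let output := "It took " ++ PySem.Int.toStr licks ++ " licks to get to the tootsie roll center of a tootsie pop."
  -- if env and max(env.values()) > 0:   (max? = none exactly when env is empty, so the
  -- match also ports the short-circuit 'env and …')
  match PySem.List.max? (env.map Prod.snd) (fun v => v) with
  | none => output
  | some v =>
    if v > 0 then
      -- toughest = max(env, key=env.get); every key is present, so env.get is get?.getD
      match PySem.List.max? (env.map Prod.fst) (fun c => ((PySem.Dict.mk env).get? c).getD 0) with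
      | some toughest => output ++ " The toughest challenge was " ++ toughest ++ "."
      | none => output
    else output

-- ===== PRECONDITION & SPEC =====
-- Pre_ excludes association lists with duplicate keys: they do not represent a Python dict
-- (A's parameter is a dict, so a duplicate key can never reach either program), and first-match
-- vs last-match on such an ill-formed list is an accident of the encoding.
def Pre_total_licks (env : List (String × Int)) : Prop := (env.map Prod.fst).Nodup
instance (env : List (String × Int)) : Decidable (Pre_total_licks env) := by unfold Pre_total_licks; infer_instance
def pvWitness_total_licks : (List (String × Int)) := [("liquorice", 3), ("broccoli", -5), ("wind", 7)]
def Spec_total_licks (env : List (String × Int)) (out : String) : Prop := out = total_licks_alt env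
instance (env : List (String × Int)) (out : String) : Decidable (Spec_total_licks env out) := by unfold Spec_total_licks; infer_instance

-- ===== CLAIM (what is proved, stated in full; the proofs are below) =====
def Claim_equal_total_licks : Prop := ∀ (env : List (String × Int)), Dom_total_licks env → Pre_total_licks env → Spec_total_licks env (total_licks env)

-- ===== LEMMAS AND PROOFS =====

-- the fold step of PySem.List.max? (first extremal element), specialised to Int keys
def mstep {α : Type} (k : α → Int) (acc : Option α) (x : α) : Option α :=
  match acc with
  | none => some x
  | some m => if k m < k x then some x else some m

theorem max?_eq_foldl {α : Type} (k : α → Int) (xs : List α) :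
    PySem.List.max? xs k = xs.foldl (mstep k) none := rfl

def comb {α : Type} (k : α → Int) (a : α) : Option α → α
  | none => a
  | some q => if k a < k q then q else a

theorem foldl_mstep_some {α : Type} (k : α → Int) (t : List α) :
    ∀ a : α, t.foldl (mstep k) (some a) = some (comb k a (t.foldl (mstep k) none)) := by
  induction t with
  | nil => intro a; simp [comb]
  | cons y t ih =>
    intro a
    have hy := ih y
    simp only [List.foldl_cons, mstep] at *
    rw [show (if k a < k y then some y else some a) = some (if k a < k y then y else a) by split_ifs <;> rfl]
    rw [ih, hy]
    rcases h : t.foldl (mstep k) none with _ | q <;>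
      simp only [comb] <;> split_ifs <;> first | rfl | omega

theorem max?_cons {α : Type} (k : α → Int) (x : α) (t : List α) :
    PySem.List.max? (x :: t) k = some (comb k x (PySem.List.max? t k)) := by
  rw [max?_eq_foldl, max?_eq_foldl]
  simpa [mstep] using foldl_mstep_some k t x

theorem max?_map {α β : Type} (f : α → β) (k : β → Int) (l : List α) :
    PySem.List.max? (l.map f) k = (PySem.List.max? l (fun x => k (f x))).map f := by
  induction l with
  | nil => rfl
  | cons x l ih =>
    rw [List.map_cons, max?_cons, max?_cons, ih]
    rcases h : PySem.List.max? l (fun x => k (f x)) with _ | q <;>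
      simp only [comb, Option.map_none, Option.map_some] <;> split_ifs <;> rfl

theorem max?_congr {α : Type} (l : List α) (k1 k2 : α → Int)
    (h : ∀ p ∈ l, k1 p = k2 p) : PySem.List.max? l k1 = PySem.List.max? l k2 := by
  induction l with
  | nil => rfl
  | cons x l ih =>
    rw [max?_cons, max?_cons, ih (fun p hp => h p (List.mem_cons_of_mem _ hp))]
    rcases hq : PySem.List.max? l k2 with _ | q
    · rfl
    · have hx : k1 x = k2 x := h x (by simp)
      have hq2 : k1 q = k2 q :=
        h q (List.mem_cons_of_mem _ (PySem.List.max?_mem hq))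
      simp only [comb]
      rw [hx, hq2]

-- first-match lookup on a nodup association list returns the pair's own value
theorem getD_of_mem_nodup (env : List (String × Int)) (p : String × Int)
    (hnd : (env.map Prod.fst).Nodup) (hp : p ∈ env) :
    ((PySem.Dict.mk env).get? p.1).getD 0 = p.2 := by
  induction env with
  | nil => cases hp
  | cons q rest ih =>
    obtain ⟨qk, qv⟩ := q
    rw [List.map_cons, List.nodup_cons] at hnd
    rcases List.mem_cons.mp hp with h | h
    · subst h
      simp [PySem.Dict.get?_mk_cons]
    · have hm : p.1 ∈ rest.map Prod.fst := List.mem_map_of_mem h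
      have hne : qk ≠ p.1 := by
        intro he
        rw [he] at hnd
        exact hnd.1 hm
      simp only [PySem.Dict.get?_mk_cons, beq_iff_eq, if_neg hne]
      exact ih hnd.2 h

-- A's toughest/max accumulator
def G (s : Option String × Int) (p : String × Int) : Option String × Int :=
  if p.2 > s.2 then (some p.1, p.2) else s

theorem G_fold (env : List (String × Int)) :
    ∀ t0 m0, env.foldl G (t0, m0) =
      match PySem.List.max? env (fun p => p.2) with
      | none => (t0, m0)
      | some q => if m0 < q.2 then (some q.1, q.2) else (t0, m0) := by
  induction env with
  | nil => intro t0 m0; rfl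
  | cons p rest ih =>
    intro t0 m0
    rw [List.foldl_cons, max?_cons]
    rcases hq : PySem.List.max? rest (fun p => p.2) with _ | q
    · cases rest with
      | nil =>
        simp only [comb, List.foldl_nil, G]
        try split_ifs <;> first | rfl | (exfalso; omega)
      | cons y t => rw [max?_cons] at hq; cases hq
    · by_cases hpm : p.2 > m0
      · have hG : G (t0, m0) p = (some p.1, p.2) := by simp [G, hpm]
        rw [hG, ih, hq]
        simp only [comb]
        split_ifs <;> first | rfl | (exfalso; omega)
      · have hG : G (t0, m0) p = (t0, m0) := by simp [G, hpm]
        rw [hG, ih, hq]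
        simp only [comb]
        split_ifs <;> first | rfl | (exfalso; omega)

theorem pair_step_eq :
    (fun (s : Int × Option String × Int) (cv : String × Int) =>
        let licks := s.1 + cv.2
        if cv.2 > s.2.2 then (licks, some cv.1, cv.2) else (licks, s.2.1, s.2.2))
      = fun (s : Int × Option String × Int) cv => (s.1 + cv.2, G s.2 cv) := by
  funext s cv
  simp only [G]
  split_ifs <;> rfl

-- ===== VERDICT (by name: the statement is the Claim_ definition above) =====
theorem total_licks_spec : Claim_equal_total_licks := by
  intro env _hdom hpre
  unfold Spec_total_licks total_licks total_licks_alt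
  rw [pair_step_eq]
  rw [PySem.List.foldl_prod_mk (f := fun (a : Int) (cv : String × Int) => a + cv.2) (g := G)]
  rw [PySem.List.foldl_add (g := fun cv : String × Int => cv.2)]
  rw [G_fold env none 0]
  rw [max?_map Prod.snd (fun v => v) env]
  rw [max?_map Prod.fst (fun c => ((PySem.Dict.mk env).get? c).getD 0) env]
  rw [max?_congr env (fun p => ((PySem.Dict.mk env).get? p.1).getD 0) (fun p => p.2)
        (fun p hp => getD_of_mem_nodup env p hpre hp)]
  rcases hq : PySem.List.max? env (fun p : String × Int => p.2) with _ | q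
  · rfl
  · simp only [Option.map_some]
    split_ifs with h1 h2 <;> first | rfl | (exfalso; omega)
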